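-- pv_equiv track=rewrite | github.com/tinnia/Code_Problem | PROGRAMMERS/17683.py | solution
-- ===== SOURCE A (Python) =====
-- def change(music):
--     music = music.replace("C#", "c")
--     music = music.replace("D#", "d")
--     music = music.replace("F#", "f")
--     music = music.replace("G#", "g")
--     music = music.replace("A#", "a")
--     return music
--
-- def solution(m, musicinfos):
--     answer = ''
--     cnt, l = -1, 0
--     m = change(m)
--     for music in musicinfos:
--         music = change(music)
--         lst = music.split(',')
--         tmp1, tmp2 = lst[0].split(':'), lst[1].split(':')
--         st = int(tmp1[0]) * 60 + int(tmp1[1])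
--         ed = int(tmp2[0]) * 60 + int(tmp2[1])
--         time = ed - st
--         tmp = lst[3] * (time // len(lst[3])) + lst[3][:(time % len(lst[3]))]
--         if m in tmp:
--             if l < time:
--                 cnt = tmp.count(m)
--                 l = time
--                 answer = lst[2]
--     if cnt == -1:
--         return "(None)"
--     else:
--         return answer
-- ===== SOURCE B (Python) =====
-- SHARP = {"C": "c", "D": "d", "F": "f", "G": "g", "A": "a"}
--
-- def norm(s):
--     # one left-to-right scan: a letter followed by '#' becomes one lowercase char
--     out = []
--     i = 0
--     while i < len(s):
--         if i + 1 < len(s) and s[i + 1] == '#' and s[i] in SHARP: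
--             out.append(SHARP[s[i]])
--             i += 2
--         else:
--             out.append(s[i])
--             i += 1
--     return ''.join(out)
--
-- def to_min(field):
--     parts = field.split(':')
--     return int(parts[0]) * 60 + int(parts[1])
--
-- def occurs(q, score, time):
--     # q occurs in the first `time` characters of the infinite repetition of `score`
--     # iff it matches at some start offset r < len(score) with r + len(q) <= time,
--     # comparing q[i] with score[(r + i) % len(score)]: no played string is built.
--     p = len(score)
--     for r in range(p):
--         if r + len(q) <= time and all(q[i] == score[(r + i) % p] for i in range(len(q))):
--             return True
--     return False
--
-- def solution(m, musicinfos):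
--     q = norm(m)
--     best_time, best_title = 0, None
--     for info in musicinfos:
--         fields = norm(info).split(',')
--         time = to_min(fields[1]) - to_min(fields[0])
--         if best_time < time and occurs(q, fields[3], time):
--             best_time, best_title = time, fields[2]
--     return best_title if best_title is not None else "(None)"
-- ===== Notes on version B (the rewrite author's own statement) =====
-- stated objective: alternative
-- what changed: B never builds the length-`time` played melody: it normalizes sharps with one left-to-right scan instead of five sequential replace() passes, and decides containment by modular-index matching of the query at each of the len(score) start offsets of the periodic played string (r + len(q) <= time and q[i] == score[(r+i) % len(score)]), replacing A's string repetition, slicing, `in` substring search and count.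
import Mathlib
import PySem

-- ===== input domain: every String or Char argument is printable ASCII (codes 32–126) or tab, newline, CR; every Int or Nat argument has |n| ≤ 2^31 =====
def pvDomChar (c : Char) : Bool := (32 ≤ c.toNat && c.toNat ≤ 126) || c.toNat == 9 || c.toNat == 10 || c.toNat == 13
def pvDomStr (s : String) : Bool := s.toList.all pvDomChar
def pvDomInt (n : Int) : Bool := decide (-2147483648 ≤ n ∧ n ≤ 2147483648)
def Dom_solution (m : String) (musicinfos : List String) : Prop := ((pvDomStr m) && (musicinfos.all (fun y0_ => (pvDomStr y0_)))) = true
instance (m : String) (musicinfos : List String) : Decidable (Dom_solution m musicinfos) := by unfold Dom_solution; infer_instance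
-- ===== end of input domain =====

-- B never materializes the played melody: it normalizes sharps in one left-to-right scan (not five
-- replace() passes) and tests the query by modular-index matching at the len(score) start offsets of the
-- periodic played string, instead of building the length-`time` string and substring-searching it.

-- ===== PORT A =====
def change (music : String) : String :=
  let music := PySem.Str.replace music "C#" "c"
  let music := PySem.Str.replace music "D#" "d"
  let music := PySem.Str.replace music "F#" "f"
  let music := PySem.Str.replace music "G#" "g"
  let music := PySem.Str.replace music "A#" "a"
  music

def solution (m : String) (musicinfos : List String) : String :=
  let mq := (change m).toList
  let res := musicinfos.foldl (fun (acc : List Char × Int × Int) music =>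
    let music := (change music).toList
    let lst := PySem.Chars.splitOn music [',']
    let tmp1 := PySem.Chars.splitOn (lst.getD 0 []) [':']
    let tmp2 := PySem.Chars.splitOn (lst.getD 1 []) [':']
    let st := ((PySem.Int.ofChars? (tmp1.getD 0 [])).getD 0) * 60 + ((PySem.Int.ofChars? (tmp1.getD 1 [])).getD 0)
    let ed := ((PySem.Int.ofChars? (tmp2.getD 0 [])).getD 0) * 60 + ((PySem.Int.ofChars? (tmp2.getD 1 [])).getD 0)
    let time := ed - st
    let mel := lst.getD 3 []
    -- lst[3] * (time // len(lst[3])) + lst[3][:(time % len(lst[3]))]  (str*int ported by hand: exact, count ≤ 0 → "")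
    let tmp := (List.replicate (PySem.Int.floordiv time (mel.length : Int)).toNat mel).flatten
                 ++ PySem.Chars.slice mel none (some (PySem.Int.mod time (mel.length : Int)))
    if PySem.Chars.isIn mq tmp then
      if acc.2.2 < time then (lst.getD 2 [], (PySem.Chars.count tmp mq : Int), time)
      else acc
    else acc) ([], -1, 0)
  if res.2.1 = -1 then "(None)" else String.ofList res.1

-- ===== PORT B =====
def sharpMap : List (Char × Char) := [('C','c'),('D','d'),('F','f'),('G','g'),('A','a')]

-- single left-to-right scan tokenizer: a letter followed by '#' becomes one lowercase char
def normGo (pats : List (Char × Char)) : List Char → List Char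
  | [] => []
  | [c] => [c]
  | c :: d :: t =>
    match pats.lookup c with
    | some r => if d = '#' then r :: normGo pats t else c :: normGo pats (d :: t)
    | none => c :: normGo pats (d :: t)
termination_by l => l.length

def normTok (s : String) : List Char := normGo sharpMap s.toList

def toMin (field : List Char) : Int :=
  let parts := PySem.Chars.splitOn field [':']
  ((PySem.Int.ofChars? (parts.getD 0 [])).getD 0) * 60 + ((PySem.Int.ofChars? (parts.getD 1 [])).getD 0)

-- q occurs in the first `time` chars of the infinite repetition of `score` iff it matches at a start
-- offset r < len(score) with r + len(q) ≤ time; indices are always in range, so getD is exact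
def occursB (q score : List Char) (time : Int) : Bool :=
  let p := score.length
  (List.range p).any fun r =>
    decide ((r : Int) + (q.length : Int) ≤ time) &&
      (List.range q.length).all fun i => q.getD i ' ' == score.getD ((r + i) % p) ' '

def solution_alt (m : String) (musicinfos : List String) : String :=
  let q := normTok m
  let res := musicinfos.foldl (fun (acc : Int × Option String) info =>
    let fields := PySem.Chars.splitOn (normTok info) [',']
    let time := toMin (fields.getD 1 []) - toMin (fields.getD 0 [])
    if acc.1 < time && occursB q (fields.getD 3 []) time then
      (time, some (String.ofList (fields.getD 2 [])))
    else acc) (0, none)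
  (res.2).getD "(None)"

-- ===== PRECONDITION & SPEC =====
-- note-normalization as both programs perform it, restated independently for the precondition only
def preNorm (s : List Char) : List Char :=
  PySem.Chars.replace (PySem.Chars.replace (PySem.Chars.replace (PySem.Chars.replace
    (PySem.Chars.replace s ['C','#'] ['c']) ['D','#'] ['d']) ['F','#'] ['f']) ['G','#'] ['g']) ['A','#'] ['a']

def timeFieldOk (f : List Char) : Bool :=
  let ps := PySem.Chars.splitOn f [':']
  decide (2 ≤ ps.length) && (PySem.Int.ofChars? (ps.getD 0 [])).isSome && (PySem.Int.ofChars? (ps.getD 1 [])).isSome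

def recordOk (info : String) : Bool :=
  let fs := PySem.Chars.splitOn (preNorm info.toList) [',']
  decide (4 ≤ fs.length) && timeFieldOk (fs.getD 0 []) && timeFieldOk (fs.getD 1 []) && !(fs.getD 3 []).isEmpty

-- Pre_ excludes exactly the inputs on which Python A raises: after note-normalization every record must
-- split into ≥ 4 comma fields, the first two fields must each have ≥ 2 ':'-parts whose first two parts are
-- int()-parseable, and the melody field must be nonempty (else ZeroDivisionError).
def Pre_solution (m : String) (musicinfos : List String) : Prop :=
  musicinfos.all recordOk = true
instance (m : String) (musicinfos : List String) : Decidable (Pre_solution m musicinfos) := by unfold Pre_solution; infer_instance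

def pvWitness_solution : String × List String :=
  ("ABC", ["12:00,12:14,HELLO,C#ABCDEF", "13:00,13:05,WORLD,ABCDEF"])

def Spec_solution (m : String) (musicinfos : List String) (out : String) : Prop := out = solution_alt m musicinfos
instance (m : String) (musicinfos : List String) (out : String) : Decidable (Spec_solution m musicinfos out) := by unfold Spec_solution; infer_instance

-- ===== CLAIM (what is proved, stated in full; the proofs are below) =====
def Claim_equal_solution : Prop := ∀ (m : String) (musicinfos : List String), Dom_solution m musicinfos → Pre_solution m musicinfos → Spec_solution m musicinfos (solution m musicinfos)

-- ===== LEMMAS AND PROOFS =====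

-- single-pattern structural version of replace for a two-char pattern [p,'#'] → [r]
def scan1 (p r : Char) : List Char → List Char
  | [] => []
  | [c] => [c]
  | c :: d :: t => if c = p ∧ d = '#' then r :: scan1 p r t else c :: scan1 p r (d :: t)
termination_by l => l.length

theorem replace_go_nil (old new : List Char) (fuel : Nat) (acc : List Char) :
    PySem.Chars.replace.go old new fuel [] acc = acc.reverse := by
  cases fuel <;> rw [PySem.Chars.replace.go] <;> simp

theorem replace_go_spec (p r : Char) :
    ∀ fuel (l acc : List Char), l.length ≤ fuel →
      PySem.Chars.replace.go [p,'#'] [r] fuel l acc = acc.reverse ++ scan1 p r l := by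
  intro fuel
  induction fuel with
  | zero =>
    intro l acc h
    have : l = [] := by simpa using h
    subst this
    rw [replace_go_nil]; simp [scan1]
  | succ f ih =>
    intro l acc h
    match l with
    | [] => rw [replace_go_nil]; simp [scan1]
    | [c] =>
      rw [PySem.Chars.replace.go]
      have hpre : List.isPrefixOf [p,'#'] [c] = false := by
        simp [List.isPrefixOf]
      simp only [hpre, Bool.false_eq_true, if_false]
      rw [replace_go_nil]
      simp [scan1]
    | c :: d :: t2 =>
      rw [PySem.Chars.replace.go]
      have hlen : (d :: t2).length ≤ f := by simpa using h
      by_cases hc : c = p ∧ d = '#'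
      · obtain ⟨rfl, rfl⟩ := hc
        have hpre : List.isPrefixOf [c,'#'] (c :: '#' :: t2) = true := by
          simp [List.isPrefixOf]
        simp only [hpre, if_true]
        have ht2 : t2.length ≤ f := by simp at hlen; omega
        rw [show (List.drop [c,'#'].length (c :: '#' :: t2)) = t2 from rfl, ih _ _ ht2]
        simp [scan1]
      · have hpre : List.isPrefixOf [p,'#'] (c :: d :: t2) = false := by
          simp [List.isPrefixOf]
          intro h1 h2
          exact absurd ⟨h1.symm, h2.symm⟩ hc
        simp only [hpre, Bool.false_eq_true, if_false]
        rw [ih _ _ hlen]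
        simp [scan1, hc]

theorem replace_eq_scan1 (p r : Char) (cs : List Char) :
    PySem.Chars.replace cs [p,'#'] [r] = scan1 p r cs := by
  rw [PySem.Chars.replace]
  simp [replace_go_spec p r cs.length cs [] (le_refl _)]

theorem lookup_cons_ne {c a b : Char} (t : List (Char × Char)) (h : c ≠ a) :
    (((a,b) :: t).lookup c) = t.lookup c := by
  rw [List.lookup_cons]; simp [beq_eq_false_iff_ne.mpr h]

theorem lookup_cons_eq {c b : Char} (t : List (Char × Char)) :
    (((c,b) :: t).lookup c) = some b := by simp

theorem normGo_nil_pats (cs : List Char) : normGo [] cs = cs := by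
  induction cs using normGo.induct [] <;> simp_all [normGo]

theorem normGo_cons_none {pats : List (Char × Char)} {c : Char} (h : pats.lookup c = none)
    (X : List Char) : normGo pats (c :: X) = c :: normGo pats X := by
  match X with
  | [] => simp [normGo]
  | d :: t => simp [normGo, h]

theorem normGo_cons_some_hash {pats : List (Char × Char)} {c rc : Char} (h : pats.lookup c = some rc)
    (X : List Char) : normGo pats (c :: '#' :: X) = rc :: normGo pats X := by
  simp [normGo, h]

theorem normGo_cons_some_nohash {pats : List (Char × Char)} {c rc e : Char} (h : pats.lookup c = some rc)
    (he : e ≠ '#') (X : List Char) : normGo pats (c :: e :: X) = c :: normGo pats (e :: X) := by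
  simp [normGo, h, he]

theorem lookup_none_of_forall {pats : List (Char × Char)} {c : Char}
    (h : ∀ x ∈ pats, c ≠ x.1) : pats.lookup c = none := by
  induction pats with
  | nil => rfl
  | cons x t ih =>
    obtain ⟨a, b⟩ := x
    rw [lookup_cons_ne t (h (a,b) (by simp))]
    exact ih (fun y hy => h y (by simp [hy]))

theorem lookup_mem_of_some {pats : List (Char × Char)} {c rc : Char}
    (h : pats.lookup c = some rc) : c ∈ pats.map Prod.fst := by
  induction pats with
  | nil => simp [List.lookup] at h
  | cons x t ih =>
    obtain ⟨a, b⟩ := x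
    by_cases hx : c = a
    · simp [hx]
    · rw [lookup_cons_ne t hx] at h
      simp [ih h]

theorem scan1_head (p r d : Char) (t : List Char) (hr : r ≠ '#') (hd : d ≠ '#') :
    ∃ e Y, scan1 p r (d :: t) = e :: Y ∧ e ≠ '#' := by
  match t with
  | [] => exact ⟨d, [], by simp [scan1], hd⟩
  | e :: t' =>
    by_cases hc : d = p ∧ e = '#'
    · obtain ⟨rfl, rfl⟩ := hc
      exact ⟨r, scan1 d r t', by simp [scan1], hr⟩
    · exact ⟨d, scan1 p r (e :: t'), by simp [scan1, hc], hd⟩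

theorem mainComp (pats : List (Char × Char)) (p r : Char)
    (hph : p ≠ '#') (hr : r ≠ '#') (hrp : ∀ x ∈ pats, r ≠ x.1) (hp : p ∉ pats.map Prod.fst)
    (cs : List Char) : normGo pats (scan1 p r cs) = normGo ((p,r)::pats) cs := by
  induction hn : cs.length using Nat.strong_induction_on generalizing cs with
  | _ n ih =>
  match cs with
  | [] => simp [scan1, normGo]
  | [c] => simp [scan1, normGo]
  | c :: d :: t =>
    have iht : normGo pats (scan1 p r t) = normGo ((p,r)::pats) t :=
      ih t.length (by subst hn; simp) t rfl
    have ihdt : normGo pats (scan1 p r (d :: t)) = normGo ((p,r)::pats) (d :: t) :=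
      ih (d :: t).length (by subst hn; simp) (d :: t) rfl
    by_cases hc : c = p ∧ d = '#'
    · obtain ⟨rfl, rfl⟩ := hc
      rw [show scan1 c r (c :: '#' :: t) = r :: scan1 c r t by simp [scan1],
          normGo_cons_none (lookup_none_of_forall hrp), iht,
          normGo_cons_some_hash (lookup_cons_eq pats)]
    · rw [show scan1 p r (c :: d :: t) = c :: scan1 p r (d :: t) by simp [scan1, hc]]
      rcases hlk : pats.lookup c with _ | rc
      · rw [normGo_cons_none hlk, ihdt]
        by_cases hcp : c = p
        · subst hcp
          have hd : d ≠ '#' := fun h => hc ⟨rfl, h⟩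
          rw [normGo_cons_some_nohash (lookup_cons_eq pats) hd]
        · rw [normGo_cons_none (show List.lookup c ((p,r)::pats) = none from by
                rw [lookup_cons_ne pats hcp]; exact hlk) (d :: t)]
      · have hcne : c ≠ p := fun h => hp (h ▸ lookup_mem_of_some hlk)
        have hlk' : ((p,r)::pats).lookup c = some rc := by rw [lookup_cons_ne pats hcne]; exact hlk
        by_cases hd : d = '#'
        · subst hd
          rw [show scan1 p r ('#' :: t) = '#' :: scan1 p r t by
                match t with
                | [] => simp [scan1]
                | e :: t' =>
                  simp only [scan1, if_neg (fun h : '#' = p ∧ e = '#' => hph h.1.symm)],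
              normGo_cons_some_hash hlk, iht, normGo_cons_some_hash hlk']
        · obtain ⟨e, Y, hscan, he⟩ := scan1_head p r d t hr hd
          rw [hscan, normGo_cons_some_nohash hlk he, ← hscan, ihdt,
              normGo_cons_some_nohash hlk' hd]

theorem preNorm_eq_normGo (cs : List Char) : preNorm cs = normGo sharpMap cs := by
  rw [preNorm, replace_eq_scan1, replace_eq_scan1, replace_eq_scan1, replace_eq_scan1,
      replace_eq_scan1]
  rw [← normGo_nil_pats (scan1 'A' 'a' (scan1 'G' 'g' (scan1 'F' 'f' (scan1 'D' 'd'
        (scan1 'C' 'c' cs)))))]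
  rw [mainComp [] 'A' 'a' (by decide) (by decide) (by decide) (by decide),
      mainComp _ 'G' 'g' (by decide) (by decide) (by decide) (by decide),
      mainComp _ 'F' 'f' (by decide) (by decide) (by decide) (by decide),
      mainComp _ 'D' 'd' (by decide) (by decide) (by decide) (by decide),
      mainComp _ 'C' 'c' (by decide) (by decide) (by decide) (by decide)]
  rfl

theorem change_toList (s : String) : (change s).toList = normGo sharpMap s.toList := by
  rw [← preNorm_eq_normGo]
  simp [change, PySem.Str.replace, preNorm, String.toList_ofList]

-- getD of the flattening of a replicated list is periodic indexing
theorem flatten_replicate_getD (k : Nat) (score : List Char) (j : Nat)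
    (hj : j < k * score.length) :
    ((List.replicate k score).flatten).getD j ' ' = score.getD (j % score.length) ' ' := by
  induction k generalizing j with
  | zero => simp at hj
  | succ k ih =>
    have hj' : j < score.length + k * score.length := by
      calc j < (k+1) * score.length := hj
        _ = score.length + k * score.length := by ring
    rw [List.replicate_succ, List.flatten_cons]
    by_cases hjs : j < score.length
    · rw [List.getD_append _ _ _ _ hjs, Nat.mod_eq_of_lt hjs]
    · rw [List.getD_append_right _ _ _ _ (Nat.le_of_not_lt hjs)]
      rw [ih (j - score.length) (by omega)]
      rw [← Nat.mod_eq_sub_mod (Nat.le_of_not_lt hjs)]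

theorem len_flatten_replicate (k : Nat) (l : List Char) :
    ((List.replicate k l).flatten).length = k * l.length := by
  simp [List.length_flatten, List.map_replicate, List.sum_replicate, smul_eq_mul]

theorem tmp_eq_take (score : List Char) (t : Int) (ht : 0 < t) (hs : score ≠ []) :
    (List.replicate (PySem.Int.floordiv t (score.length : Int)).toNat score).flatten
        ++ PySem.Chars.slice score none (some (PySem.Int.mod t (score.length : Int)))
      = List.take t.toNat
          ((List.replicate ((PySem.Int.floordiv t (score.length : Int)).toNat + 1) score).flatten) := by
  have hn0 : 0 < score.length := List.length_pos_iff.mpr hs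
  have hnz : (0:Int) < (score.length : Int) := by exact_mod_cast hn0
  have hq : PySem.Int.floordiv t (score.length : Int) = t / (score.length : Int) :=
    PySem.Int.floordiv_eq_ediv_of_pos hnz
  have hr : PySem.Int.mod t (score.length : Int) = t % (score.length : Int) :=
    PySem.Int.mod_eq_emod_of_pos hnz
  have hq0 : 0 ≤ t / (score.length : Int) := Int.ediv_nonneg (le_of_lt ht) (le_of_lt hnz)
  have hr0 : 0 ≤ t % (score.length : Int) := Int.emod_nonneg t (by omega)
  have hrn : t % (score.length : Int) < score.length := Int.emod_lt_of_pos t hnz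
  have hdm : ((score.length : Int)) * (t / score.length) + t % score.length = t :=
    Int.mul_ediv_add_emod t score.length
  rw [hq, hr, PySem.Chars.slice_eq_listSlice, PySem.List.slice_to _ hr0]
  rw [List.replicate_succ', List.flatten_append]
  have hlen : ((List.replicate (t / (score.length:Int)).toNat score).flatten).length
      = (t / (score.length:Int)).toNat * score.length := len_flatten_replicate _ _
  rw [List.take_append]
  have hk : t.toNat = (t / (score.length:Int)).toNat * score.length + (t % (score.length:Int)).toNat := by
    have hki : (t.toNat : Int)
        = ((t / (score.length:Int)).toNat * score.length + (t % (score.length:Int)).toNat : Int) := by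
      push_cast [Int.toNat_of_nonneg hq0, Int.toNat_of_nonneg (le_of_lt ht), Int.toNat_of_nonneg hr0]
      rw [mul_comm]; omega
    exact_mod_cast hki
  have h1 : t.toNat ≥ ((List.replicate (t / (score.length:Int)).toNat score).flatten).length := by
    rw [hlen]; omega
  rw [List.take_of_length_le h1, hlen,
      show t.toNat - (t / (score.length:Int)).toNat * score.length = (t % (score.length:Int)).toNat by omega]
  simp

-- the two occurrence tests agree, given the length and periodic-indexing facts about tmp
theorem occursB_eq_isIn_core (q score tmp : List Char) (t : Int) (ht : 0 < t)
    (hn0 : 0 < score.length)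
    (htmplen : tmp.length = t.toNat)
    (htmpget : ∀ j, j < t.toNat → tmp.getD j ' ' = score.getD (j % score.length) ' ') :
    occursB q score t = PySem.Chars.isIn q tmp := by
  rw [Bool.eq_iff_iff]
  constructor
  · -- modular match at r gives a prefix of tmp.drop r
    intro h
    rw [occursB, List.any_eq_true] at h
    obtain ⟨r, hrmem, hcond⟩ := h
    rw [Bool.and_eq_true, decide_eq_true_eq, List.all_eq_true] at hcond
    obtain ⟨hrq, hmatch⟩ := hcond
    have hrp : r < score.length := List.mem_range.mp hrmem
    have hrqn : r + q.length ≤ t.toNat := by omega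
    apply (PySem.Chars.exists_prefix_drop_iff_isIn q tmp).mp
    refine ⟨r, ?_⟩
    rw [List.prefix_iff_eq_take]
    apply List.ext_getElem
    · rw [List.length_take, List.length_drop, htmplen]; omega
    · intro i hi1 hi2
      have hiq : i < q.length := hi1
      have := hmatch i (List.mem_range.mpr hiq)
      rw [beq_iff_eq] at this
      have h1 : q[i] = q.getD i ' ' := by rw [List.getD_eq_getElem _ _ hiq]
      have h2 : (List.take q.length (List.drop r tmp))[i] = tmp.getD (r + i) ' ' := by
        rw [List.getElem_take, List.getElem_drop, List.getD_eq_getElem]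
      rw [h1, h2, this, htmpget (r + i) (by omega)]
  · -- a prefix of tmp.drop j gives a modular match at j % len(score)
    intro h
    obtain ⟨j, hj⟩ := (PySem.Chars.exists_prefix_drop_iff_isIn q tmp).mpr h
    rw [occursB, List.any_eq_true]
    by_cases hq : q = []
    · refine ⟨0, List.mem_range.mpr hn0, ?_⟩
      subst hq
      simp only [List.length_nil, List.range_zero, List.all_nil, Bool.and_true]
      rw [decide_eq_true_eq]
      push_cast
      omega
    · have hlq : q.length ≤ tmp.length - j := by
        have := hj.length_le
        simpa using this
      have hj0 : 0 < q.length := List.length_pos_iff.mpr hq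
      have hjlen : j + q.length ≤ t.toNat := by omega
      refine ⟨j % score.length, List.mem_range.mpr (Nat.mod_lt _ hn0), ?_⟩
      rw [Bool.and_eq_true, decide_eq_true_eq, List.all_eq_true]
      have hjm : j % score.length ≤ j := Nat.mod_le _ _
      constructor
      · have : j % score.length + q.length ≤ t.toNat := by omega
        push_cast
        omega
      · intro i hi
        have hiq : i < q.length := List.mem_range.mp hi
        rw [beq_iff_eq]
        have heq : q = List.take q.length (List.drop j tmp) := List.prefix_iff_eq_take.mp hj
        have h1 : q.getD i ' ' = tmp.getD (j + i) ' ' := by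
          rw [List.getD_eq_getElem?_getD, List.getD_eq_getElem?_getD]
          have hopt : q[i]? = (List.take q.length (List.drop j tmp))[i]? := by rw [← heq]
          rw [hopt, List.getElem?_take_of_lt hiq, List.getElem?_drop]
        rw [h1, htmpget (j + i) (by omega)]
        congr 1
        rw [Nat.mod_add_mod]

theorem occursB_eq_isIn (q score : List Char) (t : Int) (ht : 0 < t) (hs : score ≠ []) :
    occursB q score t = PySem.Chars.isIn q
      ((List.replicate (PySem.Int.floordiv t (score.length : Int)).toNat score).flatten
        ++ PySem.Chars.slice score none (some (PySem.Int.mod t (score.length : Int)))) := by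
  have hn0 : 0 < score.length := List.length_pos_iff.mpr hs
  have hnz : (0:Int) < (score.length : Int) := by exact_mod_cast hn0
  have hq : PySem.Int.floordiv t (score.length : Int) = t / (score.length : Int) :=
    PySem.Int.floordiv_eq_ediv_of_pos hnz
  have hq0 : 0 ≤ t / (score.length : Int) := Int.ediv_nonneg ht.le hnz.le
  have hKt : t.toNat ≤ ((PySem.Int.floordiv t (score.length : Int)).toNat + 1) * score.length := by
    have h1 : ((score.length : Int)) * (t / score.length) + t % score.length = t :=
      Int.mul_ediv_add_emod t score.length
    have h2 : t % (score.length : Int) < score.length := Int.emod_lt_of_pos t hnz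
    have h3 : (t.toNat : Int) ≤ ((((t / (score.length:Int)).toNat + 1 : Nat)) : Int) * score.length := by
      push_cast [Int.toNat_of_nonneg hq0, Int.toNat_of_nonneg ht.le]
      nlinarith
    rw [hq]
    exact_mod_cast h3
  apply occursB_eq_isIn_core q score _ t ht hn0
  · rw [tmp_eq_take score t ht hs, List.length_take, len_flatten_replicate]
    omega
  · intro j hj
    rw [tmp_eq_take score t ht hs]
    rw [List.getD_eq_getElem?_getD, List.getElem?_take_of_lt hj, ← List.getD_eq_getElem?_getD]
    exact flatten_replicate_getD _ score j (lt_of_lt_of_le hj hKt)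

-- the invariant tying A's (answer, cnt, l) to B's (best_time, best_title)
def PRel (acc : List Char × Int × Int) (b : Int × Option String) : Prop :=
  acc.2.2 = b.1 ∧ 0 ≤ acc.2.2 ∧
    ((acc.2.1 = -1 ∧ b.2 = none) ∨ (0 ≤ acc.2.1 ∧ b.2 = some (String.ofList acc.1)))

theorem foldl_rel {α β γ : Type} (R : β → γ → Prop) (f : β → α → β) (g : γ → α → γ) :
    ∀ (l : List α) (b : β) (c : γ), R b c →
      (∀ x ∈ l, ∀ b c, R b c → R (f b x) (g c x)) →
      R (l.foldl f b) (l.foldl g c) := by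
  intro l
  induction l with
  | nil => intro b c h _; exact h
  | cons x t ih =>
    intro b c h hstep
    exact ih (f b x) (g c x) (hstep x (by simp) b c h)
      (fun y hy => hstep y (by simp [hy]))

theorem final_of_rel (resA : List Char × Int × Int) (resB : Int × Option String)
    (h : PRel resA resB) :
    (if resA.2.1 = -1 then "(None)" else String.ofList resA.1) = resB.2.getD "(None)" := by
  obtain ⟨hl, h0, hd⟩ := h
  rcases hd with ⟨hcnt, hnone⟩ | ⟨hge, hsome⟩
  · rw [if_pos hcnt, hnone]; rfl
  · rw [if_neg (by omega), hsome]; rfl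

theorem step_core (q title mel : List Char) (time : Int)
    (acc : List Char × Int × Int) (b : Int × Option String)
    (hmel : mel ≠ []) (hR : PRel acc b) :
    PRel
      (if PySem.Chars.isIn q
            ((List.replicate (PySem.Int.floordiv time (mel.length : Int)).toNat mel).flatten
              ++ PySem.Chars.slice mel none (some (PySem.Int.mod time (mel.length : Int)))) = true then
         if acc.2.2 < time then
           (title, (PySem.Chars.count ((List.replicate (PySem.Int.floordiv time (mel.length : Int)).toNat mel).flatten
              ++ PySem.Chars.slice mel none (some (PySem.Int.mod time (mel.length : Int)))) q : Int), time)
         else acc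
       else acc)
      (if (decide (b.1 < time) && occursB q mel time) = true then
         (time, some (String.ofList title))
       else b) := by
  obtain ⟨hRl, hR0, hRd⟩ := hR
  by_cases hlt : acc.2.2 < time
  · have htpos : 0 < time := lt_of_le_of_lt hR0 hlt
    rw [occursB_eq_isIn q mel time htpos hmel]
    have hb : b.1 < time := hRl ▸ hlt
    by_cases hin : PySem.Chars.isIn q
        ((List.replicate (PySem.Int.floordiv time (mel.length : Int)).toNat mel).flatten
          ++ PySem.Chars.slice mel none (some (PySem.Int.mod time (mel.length : Int)))) = true
    · rw [if_pos hin, if_pos hlt, if_pos (by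
        simp only [Bool.and_eq_true, decide_eq_true_eq]; exact ⟨hb, hin⟩)]
      exact ⟨rfl, le_of_lt htpos, Or.inr ⟨Int.natCast_nonneg _, rfl⟩⟩
    · rw [if_neg hin, if_neg (show ¬ _ = true by
        intro hcontra
        rw [Bool.and_eq_true] at hcontra
        exact hin hcontra.2)]
      exact ⟨hRl, hR0, hRd⟩
  · have hbf : ¬ b.1 < time := hRl ▸ hlt
    rw [if_neg (show ¬ (decide (b.1 < time) && occursB q mel time) = true by
      intro hcontra
      rw [Bool.and_eq_true, decide_eq_true_eq] at hcontra
      exact hbf hcontra.1)]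
    split <;> try rw [if_neg hlt]
    all_goals exact ⟨hRl, hR0, hRd⟩

-- ===== VERDICT (by name: the statement is the Claim_ definition above) =====
set_option maxHeartbeats 1000000 in
theorem solution_spec : Claim_equal_solution := by
  intro m musicinfos _hdom hpre
  unfold Spec_solution solution solution_alt
  apply final_of_rel
  apply foldl_rel PRel
  · exact ⟨rfl, le_refl 0, Or.inl ⟨rfl, rfl⟩⟩
  · intro music hmem acc b hR
    have hok : recordOk music = true := by
      rw [Pre_solution, List.all_eq_true] at hpre
      exact hpre music hmem
    rw [recordOk, Bool.and_eq_true, Bool.and_eq_true, Bool.and_eq_true] at hok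
    obtain ⟨⟨⟨_h4, _ht0⟩, _ht1⟩, hmel⟩ := hok
    rw [preNorm_eq_normGo] at hmel
    have hscore : (PySem.Chars.splitOn (normGo sharpMap music.toList) [',']).getD 3 [] ≠ [] := by
      simpa [Bool.not_eq_eq_eq_not, List.isEmpty_iff] using hmel
    simp only [change_toList, toMin, normTok]
    exact step_core _ _ _ _ acc b hscore hR
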